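-- pv_equiv track=rewrite | github.com/parkjisu6239/2021_APS | SWEA/4831_ElectriityBus/s2.py | Bus
-- ===== SOURCE A (Python) =====
-- def Bus(K, N, M, bus_stop):
--     # 현재 버스의 위치, 마지막 충전위치, 충전횟수 초기화
--     location = K
--     last_charge = 0
--     carge = 0
--     # 현위치가 종점 전일때 반복
--     while location < N:
--         # 만약 마지막 충전위치가 내 현위치면 아래 if-else에서 계속 뒤로 가게 된 상황임
--         # 그럼 충전소간 거리가 너무 멀어서, 종점 도착이 불가능 하다는 것이므로 0을 리턴함
--         if last_charge == location:
--             return 0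
--         # 내 위치가 충전소면, 충전하고, 마지막 충전위치를 현 위치로 지정하고,
--         # 풀충 했으니까 난 내가 갈수 있는 만큼 앞으로 감
--         if bus_stop[location]:
--             carge += 1
--             last_charge = location
--             location += K
--         # 내 위치가 충전소가 아니면, 뒤로 한칸 가기
--         else:
--             location -= 1
--     return carge
-- ===== SOURCE B (Python) =====
-- def Bus(K, N, M, bus_stop):
--     pos = 0
--     count = 0
--     while pos + K < N:
--         nxt = -1
--         for j in range(pos + 1, pos + K + 1):
--             if bus_stop[j]:
--                 nxt = j
--         if nxt < 0:
--             return 0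
--         count += 1
--         pos = nxt
--     return count
-- ===== Notes on version B (the rewrite author's own statement) =====
-- stated objective: alternative
-- what changed: A walks the bus one cell at a time, backtracking from overshoot position step by step to find a charger; B keeps the current charger pos and advances it with a forward scan over the window (pos, pos+K], selecting the furthest charger directly, so there is no backtracking state (location/last_charge) at all.
-- outside the precondition, e.g. on Bus(1, 5, 1, [0, 0]): A returns 0, B returns 0; on Bus(2, 4, 1, [0, 1, 1]): A returns 1, B returns 1
import Mathlib
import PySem

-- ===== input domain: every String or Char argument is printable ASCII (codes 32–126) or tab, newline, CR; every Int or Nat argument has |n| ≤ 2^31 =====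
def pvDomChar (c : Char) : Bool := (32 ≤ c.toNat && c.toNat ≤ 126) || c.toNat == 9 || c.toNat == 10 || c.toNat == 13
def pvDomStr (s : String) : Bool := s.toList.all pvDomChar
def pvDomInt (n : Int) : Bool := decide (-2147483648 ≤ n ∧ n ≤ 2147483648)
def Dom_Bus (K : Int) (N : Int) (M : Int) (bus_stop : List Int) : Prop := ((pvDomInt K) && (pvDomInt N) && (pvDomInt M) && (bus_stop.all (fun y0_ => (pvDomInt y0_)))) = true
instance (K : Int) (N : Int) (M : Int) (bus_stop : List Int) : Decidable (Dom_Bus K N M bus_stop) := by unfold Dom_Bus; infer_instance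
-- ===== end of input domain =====

-- B replaces A's single step-by-step walk with backtracking (location/last_charge state) by an
-- outer advance-per-charger loop with a forward window scan; same values, no speed claim.

-- ===== PORT A =====
-- A's while loop as structural recursion over the state (location, last_charge, carge).
-- The 'location < last_charge' sub-case of the guard is a pure totality guard (Python's
-- descent stops at last_charge via the equality return, so that state never arises there);
-- 'none' from pyGet? is Python's IndexError, excluded by Pre_Bus.
def busLoop (K : Int) (N : Int) (bs : List Int) (location last_charge carge : Int) : Int :=
  if _h : location < N then
    if _h2 : location ≤ last_charge then 0
    else
      match PySem.List.pyGet? bs location with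
      | none => 0
      | some v =>
        if v ≠ 0 then busLoop K N bs (location + K) location (carge + 1)
        else busLoop K N bs (location - 1) last_charge carge
  else carge
termination_by ((N - last_charge).toNat, (location - last_charge).toNat)
decreasing_by
  · exact Prod.Lex.left _ _ (by omega)
  · exact Prod.Lex.right _ (by omega)

def Bus (K : Int) (N : Int) (M : Int) (bus_stop : List Int) : Int :=
  busLoop K N bus_stop K 0 0

-- ===== PORT B =====
-- Source B's outer while loop; nxt is the fold of the inner 'for j in range(pos+1, pos+K+1)'.
-- The recursion guard 'pos < nxt ∧ nxt < N' is a totality guard: whenever nxt ≥ 0 it was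
-- selected from the range, so pos < nxt ≤ pos+K < N and the guard holds; its else-branch
-- is exactly Source B's 'if nxt < 0: return 0'.  pyGetD's default stands for Source B's IndexError,
-- excluded by Pre_Bus.
def altLoop (K : Int) (N : Int) (bs : List Int) (pos count : Int) : Int :=
  if _h : pos + K < N then
    let nxt := (PySem.List.pyRange (pos + 1) (pos + K + 1) 1).foldl
      (fun acc j => if PySem.List.pyGetD bs j 0 ≠ 0 then j else acc) (-1)
    if h2 : pos < nxt ∧ nxt < N then altLoop K N bs nxt (count + 1)
    else 0
  else count
termination_by (N - pos).toNat
decreasing_by omega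

def Bus_alt (K : Int) (N : Int) (M : Int) (bus_stop : List Int) : Int :=
  altLoop K N bus_stop 0 0

-- ===== PRECONDITION & SPEC =====
-- Pre_ excludes inputs whose loop A enters with fewer than N entries in bus_stop (A indexes
-- positions up to N-1 and in general raises IndexError) and with negative K (A's negative
-- indices wrap and its walk only moves left, ending in IndexError); when N ≤ K the loop
-- never runs, so those inputs stay inside.
def Pre_Bus (K : Int) (N : Int) (M : Int) (bus_stop : List Int) : Prop :=
  N ≤ K ∨ (0 ≤ K ∧ N ≤ (bus_stop.length : Int))
instance (K : Int) (N : Int) (M : Int) (bus_stop : List Int) : Decidable (Pre_Bus K N M bus_stop) := by unfold Pre_Bus; infer_instance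

def pvWitness_Bus : Int × Int × Int × List Int := (2, 4, 1, [0, 1, 1, 0])

def Spec_Bus (K : Int) (N : Int) (M : Int) (bus_stop : List Int) (out : Int) : Prop := out = Bus_alt K N M bus_stop
instance (K : Int) (N : Int) (M : Int) (bus_stop : List Int) (out : Int) : Decidable (Spec_Bus K N M bus_stop out) := by unfold Spec_Bus; infer_instance

-- ===== CLAIM (what is proved, stated in full; the proofs are below) =====
def Claim_equal_Bus : Prop := ∀ (K : Int) (N : Int) (M : Int) (bus_stop : List Int), Dom_Bus K N M bus_stop → Pre_Bus K N M bus_stop → Spec_Bus K N M bus_stop (Bus K N M bus_stop)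

-- ===== LEMMAS AND PROOFS =====

-- largest j with pos < j ≤ loc and bs[j] ≠ 0, searched downward (characterises A's backtrack)
def findDown (bs : List Int) (pos loc : Int) : Option Int :=
  if _h : loc ≤ pos then none
  else if PySem.List.pyGetD bs loc 0 ≠ 0 then some loc
  else findDown bs pos (loc - 1)
termination_by (loc - pos).toNat

theorem findDown_bounds (bs : List Int) :
    ∀ (n : Nat) (pos loc j : Int), (loc - pos).toNat ≤ n →
    findDown bs pos loc = some j → pos < j ∧ j ≤ loc := by
  intro n
  induction n with
  | zero =>
      intro pos loc j hn h
      rw [findDown] at h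
      simp [show loc ≤ pos by omega] at h
  | succ n ih =>
      intro pos loc j hn h
      rw [findDown] at h
      by_cases hle : loc ≤ pos
      · simp [hle] at h
      · by_cases hv : PySem.List.pyGetD bs loc 0 ≠ 0
        · simp [hle, hv] at h; omega
        · simp only [hle, hv, dif_neg, not_false_iff] at h
          have := ih pos (loc - 1) j (by omega) h
          omega

-- B's inner forward fold computes findDown (with default a when no charger is in the window)
theorem fold_eq_findDown (bs : List Int) (pos : Int) :
    ∀ (n : Nat) (u a : Int), (u - pos).toNat ≤ n →
    (PySem.List.pyRange (pos + 1) (u + 1) 1).foldl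
      (fun acc j => if PySem.List.pyGetD bs j 0 ≠ 0 then j else acc) a
      = (findDown bs pos u).getD a := by
  intro n
  induction n with
  | zero =>
      intro u a hu
      have hle : u ≤ pos := by omega
      rw [PySem.List.pyRange_one_eq_nil (by omega), findDown]
      simp [hle]
  | succ n ih =>
      intro u a hu
      by_cases hle : u ≤ pos
      · rw [PySem.List.pyRange_one_eq_nil (by omega), findDown]
        simp [hle]
      · rw [PySem.List.pyRange_one_succ_right (by omega), List.foldl_append]
        rw [findDown]
        by_cases hv : PySem.List.pyGetD bs u 0 ≠ 0
        · simp [hle, hv]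
        · simp only [hle, hv]
          simp only [List.foldl_cons, List.foldl_nil, if_neg hv]
          have := ih (u - 1) a (by omega)
          simpa using this

-- A's backtracking descent from loc reaches exactly findDown's charger (or returns 0)
theorem descent (K N : Int) (bs : List Int) (hlen : N ≤ (bs.length : Int)) :
    ∀ (n : Nat) (loc pos count : Int), (loc - pos).toNat ≤ n →
    0 ≤ pos → pos ≤ loc → loc < N →
    busLoop K N bs loc pos count =
      (match findDown bs pos loc with
       | none => 0
       | some j => busLoop K N bs (j + K) j (count + 1)) := by
  intro n
  induction n with
  | zero =>
      intro loc pos count hn h0 hpl hlN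
      have hle : loc ≤ pos := by omega
      rw [busLoop, findDown]
      simp [hlN, hle]
  | succ n ih =>
      intro loc pos count hn h0 hpl hlN
      by_cases hle : loc ≤ pos
      · rw [busLoop, findDown]; simp [hlN, hle]
      · have hget : PySem.List.pyGet? bs loc = some (PySem.List.pyGetD bs loc 0) := by
          rw [PySem.List.pyGetD_eq_getElem bs 0 (by omega) (by omega)]
          exact PySem.List.pyGet?_eq_some_getElem bs (by omega) (by omega)
        rw [busLoop, findDown]
        by_cases hv : PySem.List.pyGetD bs loc 0 ≠ 0
        · simp [hlN, hle, hget, hv]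
        · have hv0 : PySem.List.pyGetD bs loc 0 = 0 := by simpa using hv
          simpa [hlN, hle, hget, hv0] using
            ih (loc - 1) pos count (by omega) h0 (by omega) (by omega)

-- the outer correspondence: A at state (pos+K, pos, count) equals B at state (pos, count)
theorem outer (K N : Int) (bs : List Int) (hK : 0 ≤ K) (hlen : N ≤ (bs.length : Int)) :
    ∀ (n : Nat) (pos count : Int), (N - pos).toNat ≤ n → 0 ≤ pos →
    busLoop K N bs (pos + K) pos count = altLoop K N bs pos count := by
  intro n
  induction n with
  | zero =>
      intro pos count hn h0
      have hN : ¬ pos + K < N := by omega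
      rw [busLoop, altLoop]; simp [hN]
  | succ n ih =>
      intro pos count hn h0
      by_cases hN : pos + K < N
      · rw [descent K N bs hlen ((pos + K) - pos).toNat (pos + K) pos count (le_refl _) h0 (by omega) hN]
        rw [altLoop]
        rw [fold_eq_findDown bs pos ((pos + K) - pos).toNat (pos + K) (-1) (le_refl _)]
        cases hf : findDown bs pos (pos + K) with
        | none => simp [hN]; omega
        | some j =>
            have hb := findDown_bounds bs ((pos + K) - pos).toNat pos (pos + K) j (le_refl _) hf
            have hcond : pos < j ∧ j < N := ⟨hb.1, by omega⟩
            simp only [Option.getD_some, dif_pos hN, dif_pos hcond]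
            exact ih j (count + 1) (by omega) (by omega)
      · rw [busLoop, altLoop]; simp [hN]

-- ===== VERDICT (by name: the statement is the Claim_ definition above) =====
theorem Bus_spec : Claim_equal_Bus := by
  intro K N M bus_stop _hdom hpre
  unfold Spec_Bus Bus Bus_alt
  rcases hpre with hNK | ⟨hK, hlen⟩
  · -- loop never runs on either side
    rw [busLoop, altLoop]
    have h1 : ¬ (K : Int) < N := by omega
    simp [h1]
  · have := outer K N bus_stop hK hlen (N - 0).toNat 0 0 (le_refl _) (le_refl _)
    simpa using this
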